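-- pv_equiv track=rewrite | github.com/varjolab/ProteoGyver | app/components/windowmaker_utils.py | check_for
-- ===== SOURCE A (Python) =====
-- def check_for(vals, tocheck):
--     retval = []
--     for v in vals:
--         if tocheck[0] in v:
--             retval.append(v)
--     if len(retval) > 1:
--         return check_for(retval, tocheck[1:])
--     elif len(retval) == 0:
--         return [v for v in vals if v!=''][0]
--     return retval[0]
-- ===== SOURCE B (Python) =====
-- def check_for(vals, tocheck):
--     # Different decomposition: one pass computes, for each value, the length of the
--     # longest prefix of tocheck all of whose tokens it contains; then the answer is
--     # read off at the first threshold where at most one value survives.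
--     def depth(v):
--         d = 0
--         for t in tocheck:
--             if t in v:
--                 d += 1
--             else:
--                 break
--         return d
--     depths = [depth(v) for v in vals]
--     m = 1
--     while len([d for d in depths if d >= m]) > 1:
--         m += 1
--     candidates = [v for v, d in zip(vals, depths) if d >= m]
--     if candidates:
--         return candidates[0]
--     prev = [v for v, d in zip(vals, depths) if d >= m - 1 and v != '']
--     return prev[0]
-- ===== Notes on version B (the rewrite author's own statement) =====
-- stated objective: alternative
-- what changed: Replaces the recursive re-filtering with a two-phase algorithm: one pass computes each value's depth (length of the longest prefix of tocheck whose tokens it all contains), then a threshold scan finds the first level with at most one survivor and reads the answer off the depths.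
import Mathlib
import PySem

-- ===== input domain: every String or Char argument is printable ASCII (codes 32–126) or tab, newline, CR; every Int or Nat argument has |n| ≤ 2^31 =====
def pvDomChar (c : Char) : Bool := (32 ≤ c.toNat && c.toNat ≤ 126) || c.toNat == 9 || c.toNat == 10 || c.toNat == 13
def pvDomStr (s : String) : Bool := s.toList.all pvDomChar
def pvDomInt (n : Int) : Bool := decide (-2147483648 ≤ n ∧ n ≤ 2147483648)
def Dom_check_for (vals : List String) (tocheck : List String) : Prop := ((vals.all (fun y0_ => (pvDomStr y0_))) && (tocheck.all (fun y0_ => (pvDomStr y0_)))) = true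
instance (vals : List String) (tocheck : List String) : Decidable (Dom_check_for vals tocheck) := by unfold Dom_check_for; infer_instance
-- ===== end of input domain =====

-- B replaces A's recursive re-filtering by a per-value "depth" pass plus a threshold scan
-- (alternative decomposition, similar cost); A = B is proved on Pre_ (exactly where A returns).


-- ===== PORT A =====
-- the 'for v in vals: if tocheck[0] in v: retval.append(v)' loop
def aRet (vals : List String) (t : String) : List String :=
  vals.foldl (fun acc v => if PySem.Str.isIn t v then acc ++ [v] else acc) []

def check_for (vals : List String) (tocheck : List String) : String :=
  match tocheck with
  | [] => ""       -- Python raises IndexError on tocheck[0]; excluded by Pre_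
  | t :: rest =>
      let retval := aRet vals t
      if 1 < retval.length then check_for retval rest
      else if retval.length = 0 then
        -- '[v for v in vals if v != ""][0]'; raises on empty list, excluded by Pre_
        (vals.filter (fun v => !(v == ""))).headD ""
      else retval.headD ""

-- ===== PORT B =====
-- length of the longest prefix of toks whose tokens are all contained in v (loop with break)
def depthB (v : String) : List String → Nat
  | [] => 0
  | t :: rest => if PySem.Str.isIn t v then 1 + depthB v rest else 0

-- len([d for d in depths if d >= m])
def countGe (depths : List Nat) (m : Nat) : Nat := (depths.filter (fun d => decide (m ≤ d))).length

-- lemma needed by findM's termination proof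
theorem le_foldr_max {d : Nat} {l : List Nat} (h : d ∈ l) : d ≤ l.foldr max 0 := by
  induction l with
  | nil => simp at h
  | cons x xs ih =>
      rcases List.mem_cons.mp h with h | h
      · exact h ▸ Nat.le_max_left _ _
      · exact le_trans (ih h) (Nat.le_max_right _ _)

theorem exists_of_countGe_pos {l : List Nat} {m : Nat} (h : 0 < countGe l m) : ∃ d ∈ l, m ≤ d := by
  unfold countGe at h
  rcases List.exists_mem_of_length_pos h with ⟨d, hd⟩
  rcases List.mem_filter.mp hd with ⟨hmem, hdec⟩
  exact ⟨d, hmem, by simpa using hdec⟩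

-- the 'while len([d for d in depths if d >= m]) > 1: m += 1' loop
def findM (depths : List Nat) (m : Nat) : Nat :=
  if h : 1 < countGe depths m then findM depths (m + 1) else m
termination_by depths.foldr max 0 + 1 - m
decreasing_by
  rcases exists_of_countGe_pos (Nat.lt_of_lt_of_le Nat.zero_lt_one (le_of_lt h)) with ⟨d, hd, hmd⟩
  have := le_foldr_max hd
  omega

def check_for_alt (vals : List String) (tocheck : List String) : String :=
  let depths := vals.map (fun v => depthB v tocheck)
  let m := findM depths 1
  let candidates := ((vals.zip depths).filter (fun p => decide (m ≤ p.2))).map Prod.fst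
  if candidates.isEmpty then
    -- 'prev = [v for v,d in zip(vals,depths) if d >= m-1 and v != ""]; return prev[0]' (raises on empty, excluded by Pre_)
    (((vals.zip depths).filter (fun p => decide (m - 1 ≤ p.2) && !(p.1 == ""))).map Prod.fst).headD ""
  else candidates.headD ""

-- ===== PRECONDITION & SPEC =====
-- helpers for Pre_ (independent of both ports)
def prefAll (v : String) (toks : List String) : Bool := toks.all (fun t => PySem.Str.isIn t v)
def fcount (vals toks : List String) (k : Nat) : Nat := (vals.filter (fun v => prefAll v (toks.take k))).length

-- Pre_ = exactly the inputs on which Python A returns: the successive filters reach a level i,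
-- within the token list, with at most one survivor, and there the result exists (one survivor,
-- or a nonempty string at the previous level for the fallback '[v for v in vals if v != ""][0]');
-- otherwise A raises IndexError.
def Pre_check_for (vals : List String) (tocheck : List String) : Prop :=
  ∃ i < tocheck.length, fcount vals tocheck (i + 1) ≤ 1 ∧
    (∀ j < i, 1 < fcount vals tocheck (j + 1)) ∧
    (fcount vals tocheck (i + 1) = 1 ∨ ∃ v ∈ vals, prefAll v (tocheck.take i) = true ∧ v ≠ "")

instance (vals : List String) (tocheck : List String) : Decidable (Pre_check_for vals tocheck) := by
  unfold Pre_check_for; infer_instance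

def pvWitness_check_for : List String × List String := (["ab", "cd"], ["a"])

def Spec_check_for (vals : List String) (tocheck : List String) (out : String) : Prop := out = check_for_alt vals tocheck
instance (vals : List String) (tocheck : List String) (out : String) : Decidable (Spec_check_for vals tocheck out) := by unfold Spec_check_for; infer_instance

-- ===== CLAIM (what is proved, stated in full; the proofs are below) =====
def Claim_equal_check_for : Prop := ∀ (vals : List String) (tocheck : List String), Dom_check_for vals tocheck → Pre_check_for vals tocheck → Spec_check_for vals tocheck (check_for vals tocheck)

-- ===== LEMMAS AND PROOFS =====

theorem aRet_eq (vals : List String) (t : String) :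
    aRet vals t = vals.filter (fun v => PySem.Str.isIn t v) := by
  unfold aRet
  suffices h : ∀ (l acc : List String),
      l.foldl (fun acc v => if PySem.Str.isIn t v then acc ++ [v] else acc) acc
        = acc ++ l.filter (fun v => PySem.Str.isIn t v) by
    simpa using h vals []
  intro l
  induction l with
  | nil => simp
  | cons x xs ih =>
      intro acc
      by_cases hx : PySem.Str.isIn t x = true
      · rw [List.foldl_cons, List.filter_cons, if_pos hx, if_pos hx, ih]
        simp
      · rw [List.foldl_cons, List.filter_cons, if_neg hx, if_neg hx, ih]

theorem zipmap_filter_fst {α β : Type} (f : α → β) (p : α × β → Bool) (xs : List α) :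
    (((xs.zip (xs.map f)).filter p).map Prod.fst) = xs.filter (fun x => p (x, f x)) := by
  induction xs with
  | nil => simp
  | cons x l ih =>
      by_cases hx : p (x, f x)
      · simp [List.filter_cons, hx, ih]
      · simp [List.filter_cons, hx, ih]

theorem countGe_map (vals : List String) (f : String → Nat) (m : Nat) :
    countGe (vals.map f) m = (vals.filter (fun v => decide (m ≤ f v))).length := by
  unfold countGe
  rw [List.filter_map]
  simp [Function.comp_def]

-- B in filter form
theorem alt_eq (vals toks : List String) :
    check_for_alt vals toks =
      (fun m =>
        (fun cands =>
          if cands.isEmpty then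
            (vals.filter (fun v => decide (m - 1 ≤ depthB v toks) && !(v == ""))).headD ""
          else cands.headD "")
        (vals.filter (fun v => decide (m ≤ depthB v toks))))
      (findM (vals.map (fun v => depthB v toks)) 1) := by
  unfold check_for_alt
  simp only [zipmap_filter_fst]

-- pointwise depth facts
theorem depth_succ_decide (v t : String) (rest : List String) (m : Nat) :
    decide (m + 1 ≤ depthB v (t :: rest)) = (PySem.Str.isIn t v && decide (m ≤ depthB v rest)) := by
  cases h : PySem.Str.isIn t v
  · simp only [depthB, h, Bool.false_eq_true, if_false, Bool.false_and]
    exact decide_eq_false (by omega)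
  · simp only [depthB, h, if_true, Bool.true_and]
    exact decide_eq_decide.mpr (by omega)

theorem depth_one_decide (v t : String) (rest : List String) :
    decide (1 ≤ depthB v (t :: rest)) = PySem.Str.isIn t v := by
  cases h : PySem.Str.isIn t v
  · simp only [depthB, h, Bool.false_eq_true, if_false]
    exact decide_eq_false (by omega)
  · simp only [depthB, h, if_true]
    exact decide_eq_true (by omega)

theorem filter_shift (vals : List String) (t : String) (rest : List String) (m : Nat) :
    vals.filter (fun v => decide (m + 1 ≤ depthB v (t :: rest)))
      = (vals.filter (fun v => PySem.Str.isIn t v)).filter (fun v => decide (m ≤ depthB v rest)) := by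
  rw [List.filter_filter]
  apply List.filter_congr
  intro v _
  rw [depth_succ_decide, Bool.and_comm]

theorem countGe_shift (vals : List String) (t : String) (rest : List String) (m : Nat) :
    countGe (vals.map (fun v => depthB v (t :: rest))) (m + 1)
      = countGe ((vals.filter (fun v => PySem.Str.isIn t v)).map (fun v => depthB v rest)) m := by
  rw [countGe_map, countGe_map, filter_shift]

theorem findM_pos (depths : List Nat) (m : Nat) (h : 1 < countGe depths m) :
    findM depths m = findM depths (m + 1) := by
  conv_lhs => rw [findM]
  rw [dif_pos h]

theorem findM_neg (depths : List Nat) (m : Nat) (h : ¬ 1 < countGe depths m) :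
    findM depths m = m := by
  conv_lhs => rw [findM]
  rw [dif_neg h]

theorem le_findM (depths : List Nat) (m : Nat) : m ≤ findM depths m := by
  fun_induction findM depths m with
  | case1 m h ih => omega
  | case2 m h => omega

theorem findM_shift (dv dr : List Nat) (hc : ∀ m, countGe dv (m + 1) = countGe dr m) (m : Nat) :
    findM dv (m + 1) = 1 + findM dr m := by
  fun_induction findM dr m with
  | case1 m h ih =>
      rw [findM_pos dv (m + 1) (by rw [hc]; exact h)]
      exact ih
  | case2 m h =>
      rw [findM_neg dv (m + 1) (by rw [hc]; exact h)]
      omega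

-- B makes the same step as A's recursion when more than one value survives the first token
theorem alt_step (vals : List String) (t : String) (rest : List String)
    (hgt : 1 < (vals.filter (fun v => PySem.Str.isIn t v)).length) :
    check_for_alt vals (t :: rest) = check_for_alt (vals.filter (fun v => PySem.Str.isIn t v)) rest := by
  rw [alt_eq, alt_eq]
  have hc : ∀ m, countGe (vals.map (fun v => depthB v (t :: rest))) (m + 1)
      = countGe ((vals.filter (fun v => PySem.Str.isIn t v)).map (fun v => depthB v rest)) m :=
    fun m => countGe_shift vals t rest m
  have hc1 : countGe (vals.map (fun v => depthB v (t :: rest))) 1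
      = (vals.filter (fun v => PySem.Str.isIn t v)).length := by
    rw [countGe_map]
    congr 1
    apply List.filter_congr
    intro v _
    exact depth_one_decide v t rest
  have hm : findM (vals.map (fun v => depthB v (t :: rest))) 1
      = 1 + findM ((vals.filter (fun v => PySem.Str.isIn t v)).map (fun v => depthB v rest)) 1 := by
    rw [findM_pos _ 1 (by rw [hc1]; exact hgt)]
    exact findM_shift _ _ hc 1
  rw [hm]
  have hm1 : 1 ≤ findM ((vals.filter (fun v => PySem.Str.isIn t v)).map (fun v => depthB v rest)) 1 :=
    le_findM _ 1
  generalize hM : findM ((vals.filter (fun v => PySem.Str.isIn t v)).map (fun v => depthB v rest)) 1 = M at hm1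
  have hcand : vals.filter (fun v => decide (1 + M ≤ depthB v (t :: rest)))
      = (vals.filter (fun v => PySem.Str.isIn t v)).filter (fun v => decide (M ≤ depthB v rest)) := by
    rw [Nat.add_comm 1 M]; exact filter_shift vals t rest M
  have hprev : vals.filter (fun v => decide (1 + M - 1 ≤ depthB v (t :: rest)) && !(v == ""))
      = (vals.filter (fun v => PySem.Str.isIn t v)).filter
          (fun v => decide (M - 1 ≤ depthB v rest) && !(v == "")) := by
    rw [List.filter_filter]
    apply List.filter_congr
    intro v _
    have : decide (1 + M - 1 ≤ depthB v (t :: rest))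
        = (PySem.Str.isIn t v && decide (M - 1 ≤ depthB v rest)) := by
      cases h : PySem.Str.isIn t v
      · simp only [depthB, h, Bool.false_eq_true, if_false, Bool.false_and]
        exact decide_eq_false (by omega)
      · simp only [depthB, h, if_true, Bool.true_and]
        exact decide_eq_decide.mpr (by omega)
    rw [this]
    cases PySem.Str.isIn t v <;> cases decide (M - 1 ≤ depthB v rest) <;> simp
  simp only [hcand, hprev]

-- B agrees with A's terminal branches when at most one value survives the first token
theorem alt_base (vals : List String) (t : String) (rest : List String)
    (hle : ¬ 1 < (vals.filter (fun v => PySem.Str.isIn t v)).length) :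
    check_for_alt vals (t :: rest) =
      (if (vals.filter (fun v => PySem.Str.isIn t v)).length = 0 then
        (vals.filter (fun v => !(v == ""))).headD ""
      else (vals.filter (fun v => PySem.Str.isIn t v)).headD "") := by
  rw [alt_eq]
  have hc1 : countGe (vals.map (fun v => depthB v (t :: rest))) 1
      = (vals.filter (fun v => PySem.Str.isIn t v)).length := by
    rw [countGe_map]
    congr 1
    apply List.filter_congr
    intro v _
    exact depth_one_decide v t rest
  have hm : findM (vals.map (fun v => depthB v (t :: rest))) 1 = 1 :=
    findM_neg _ 1 (by rw [hc1]; exact hle)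
  simp only [hm]
  have hcand : vals.filter (fun v => decide (1 ≤ depthB v (t :: rest)))
      = vals.filter (fun v => PySem.Str.isIn t v) := by
    apply List.filter_congr
    intro v _
    exact depth_one_decide v t rest
  have hprev : vals.filter (fun v => decide (1 - 1 ≤ depthB v (t :: rest)) && !(v == ""))
      = vals.filter (fun v => !(v == "")) := by
    apply List.filter_congr
    intro v _
    simp
  simp only [hcand, hprev]
  by_cases h0 : (vals.filter (fun v => PySem.Str.isIn t v)).length = 0
  · rw [if_pos (List.isEmpty_iff.mpr (List.length_eq_zero_iff.mp h0)), if_pos h0]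
  · rw [if_neg (by simpa [List.isEmpty_iff, ← List.length_eq_zero_iff] using h0), if_neg h0]

theorem fcount_shift (vals : List String) (t : String) (rest : List String) (k : Nat) :
    fcount vals (t :: rest) (k + 1)
      = fcount (vals.filter (fun v => PySem.Str.isIn t v)) rest k := by
  unfold fcount
  rw [List.filter_filter]
  congr 1
  apply List.filter_congr
  intro v _
  simp [prefAll, Bool.and_comm]

-- Pre_ descends along A's recursion
theorem pre_step (vals : List String) (t : String) (rest : List String)
    (hpre : Pre_check_for vals (t :: rest))
    (hgt : 1 < (vals.filter (fun v => PySem.Str.isIn t v)).length) :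
    Pre_check_for (vals.filter (fun v => PySem.Str.isIn t v)) rest := by
  obtain ⟨i, hi, h1, hmin, hok⟩ := hpre
  have hF1 : fcount vals (t :: rest) 1 = (vals.filter (fun v => PySem.Str.isIn t v)).length := by
    unfold fcount
    congr 1
    apply List.filter_congr
    intro v _
    simp [prefAll]
  match i, hi, h1, hmin, hok with
  | 0, hi, h1, hmin, hok =>
      simp only [Nat.zero_add] at h1
      rw [hF1] at h1
      omega
  | i' + 1, hi, h1, hmin, hok =>
      refine ⟨i', by simpa using hi, ?_, ?_, ?_⟩
      · rw [← fcount_shift]; exact h1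
      · intro j hj
        rw [← fcount_shift]
        exact hmin (j + 1) (by omega)
      · rcases hok with hok | ⟨v, hv, hp, hne⟩
        · left; rw [← fcount_shift]; exact hok
        · right
          refine ⟨v, ?_, ?_, hne⟩
          · apply List.mem_filter.mpr
            refine ⟨hv, ?_⟩
            have : prefAll v (t :: rest.take i') = true := by simpa using hp
            simp [prefAll] at this
            simp [this.1]
          · have : prefAll v (t :: rest.take i') = true := by simpa using hp
            simp [prefAll] at this
            simp [prefAll]
            exact this.2

theorem main_equiv : ∀ (tocheck vals : List String),
    Pre_check_for vals tocheck → check_for vals tocheck = check_for_alt vals tocheck := by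
  intro tocheck
  induction tocheck with
  | nil =>
      intro vals hpre
      obtain ⟨i, hi, _⟩ := hpre
      simp at hi
  | cons t rest ih =>
      intro vals hpre
      by_cases hgt : 1 < (vals.filter (fun v => PySem.Str.isIn t v)).length
      · rw [show check_for vals (t :: rest)
              = check_for (vals.filter (fun v => PySem.Str.isIn t v)) rest by
            rw [check_for]; simp only [aRet_eq]; rw [if_pos hgt]]
        rw [alt_step vals t rest hgt]
        exact ih _ (pre_step vals t rest hpre hgt)
      · rw [check_for]
        simp only [aRet_eq]
        rw [if_neg hgt, alt_base vals t rest hgt]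

-- ===== VERDICT (by name: the statement is the Claim_ definition above) =====
theorem check_for_spec : Claim_equal_check_for := by
  intro vals tocheck _ hpre
  unfold Spec_check_for
  exact main_equiv tocheck vals hpre
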